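-- pv_equiv track=rewrite | github.com/kblab2024/margin-chunk | surgical_rag/fusion.py | merge_indices
-- ===== SOURCE A (Python) =====
-- from typing import List, Tuple
--
-- def merge_indices(indices_list: List[List[int]]) -> List[List[int]]:
--     """
--     Merge overlapping or adjacent index ranges.
--
--     Args:
--         indices_list: List of index lists, e.g., [[4, 5], [5, 6], [10, 11]]
--
--     Returns:
--         Merged index ranges, e.g., [[4, 5, 6], [10, 11]]
--     """
--     if not indices_list:
--         return []
--
--     # Flatten and get unique indices, then sort
--     all_indices = set()
--     for indices in indices_list:
--         all_indices.update(indices)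
--
--     if not all_indices:
--         return []
--
--     sorted_indices = sorted(all_indices)
--
--     # Group consecutive indices
--     merged = []
--     current_group = [sorted_indices[0]]
--
--     for i in range(1, len(sorted_indices)):
--         if sorted_indices[i] == sorted_indices[i - 1] + 1:
--             # Consecutive - add to current group
--             current_group.append(sorted_indices[i])
--         else:
--             # Gap - start new group
--             merged.append(current_group)
--             current_group = [sorted_indices[i]]
--
--     # Add the last group
--     merged.append(current_group)
--
--     return merged
-- ===== SOURCE B (Python) =====
-- def merge_indices(indices_list):
--     """Same result as A: dedup+sort, then bucket each index by (value - position):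
--     consecutive values share one key, so each bucket is one merged run."""
--     sorted_indices = sorted({i for idxs in indices_list for i in idxs})
--     runs = {}
--     for pos, v in enumerate(sorted_indices):
--         runs.setdefault(v - pos, []).append(v)
--     return list(runs.values())
-- ===== Notes on version B (the rewrite author's own statement) =====
-- stated objective: alternative
-- what changed: Replaces A's explicit scan with branching on sorted[i] == sorted[i-1]+1 and a current_group/merged accumulator pair by a branch-free single pass that buckets each sorted index into a dict keyed by value-minus-position (constant exactly on a consecutive run) and returns the dict's values.
import Mathlib
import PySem

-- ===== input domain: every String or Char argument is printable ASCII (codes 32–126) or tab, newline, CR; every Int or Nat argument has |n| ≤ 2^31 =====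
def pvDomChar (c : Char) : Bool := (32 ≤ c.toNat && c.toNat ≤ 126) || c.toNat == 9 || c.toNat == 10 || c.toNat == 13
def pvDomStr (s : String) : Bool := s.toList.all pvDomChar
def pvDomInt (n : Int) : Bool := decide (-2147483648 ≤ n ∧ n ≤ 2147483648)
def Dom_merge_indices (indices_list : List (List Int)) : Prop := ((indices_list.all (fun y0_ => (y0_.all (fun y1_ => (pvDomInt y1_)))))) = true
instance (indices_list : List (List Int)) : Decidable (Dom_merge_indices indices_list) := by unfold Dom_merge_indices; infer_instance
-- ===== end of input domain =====

-- B merges consecutive index runs by bucketing each sorted index under the key (value - position)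
-- instead of A's branching scan; same result, same O(n log n) cost (objective: alternative).

-- ===== PORT A =====
-- the for-loop over range(1, len(sorted_indices)): state (merged, current_group),
-- prev = sorted_indices[i-1], walking the tail of the sorted list
def mergeLoop (merged : List (List Int)) (cur : List Int) (prev : Int) : List Int → List (List Int)
  | [] => merged ++ [cur]
  | x :: rest =>
    if x = prev + 1 then mergeLoop merged (cur ++ [x]) x rest
    else mergeLoop (merged ++ [cur]) [x] x rest

-- 'sorted_indices[0]' and the loop, guarded by the nonempty set; [] branch is unreachable
def mergeTop (s : List Int) : List (List Int) :=
  match s with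
  | [] => []
  | h :: t => mergeLoop [] [h] h t

def merge_indices (indices_list : List (List Int)) : List (List Int) :=
  if indices_list = [] then []
  else
    let all_indices : PySem.Set Int :=
      indices_list.foldl (fun s indices => PySem.Set.update s indices) PySem.Set.empty
    if all_indices = [] then []
    else mergeTop (PySem.List.sorted all_indices (fun x => x) false)

-- ===== PORT B =====
-- runs.setdefault(v - pos, []).append(v)  ==  runs[v-pos] = runs.get(v-pos, []) + [v]
def runStep (d : PySem.Dict Int (List Int)) (p : Int × Int) : PySem.Dict Int (List Int) :=
  d.modify (p.2 - p.1) [] (fun l => l ++ [p.2])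

def merge_indices_alt (indices_list : List (List Int)) : List (List Int) :=
  let sorted_indices :=
    PySem.List.sorted (PySem.Set.ofList indices_list.flatten) (fun x => x) false
  ((PySem.List.enumerate sorted_indices 0).foldl runStep PySem.Dict.empty).values

-- ===== PRECONDITION & SPEC =====
def Spec_merge_indices (indices_list : List (List Int)) (out : List (List Int)) : Prop := out = merge_indices_alt indices_list
instance (indices_list : List (List Int)) (out : List (List Int)) : Decidable (Spec_merge_indices indices_list out) := by unfold Spec_merge_indices; infer_instance

-- ===== CLAIM (what is proved, stated in full; the proofs are below) =====
def Claim_equal_merge_indices : Prop := ∀ (indices_list : List (List Int)), Dom_merge_indices indices_list → Spec_merge_indices indices_list (merge_indices indices_list)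

-- ===== LEMMAS AND PROOFS =====

lemma foldl_update_aux (L : List (List Int)) : ∀ (s : PySem.Set Int),
    L.foldl (fun s indices => PySem.Set.update s indices) s = PySem.Set.update s L.flatten := by
  induction L with
  | nil => intro s; simp [PySem.Set.update]
  | cons a L ih =>
    intro s
    rw [List.foldl_cons, ih, List.flatten_cons]
    simp [PySem.Set.update, List.foldl_append]

lemma foldl_update_eq (L : List (List Int)) :
    L.foldl (fun s indices => PySem.Set.update s indices) PySem.Set.empty
      = PySem.Set.ofList L.flatten := by
  rw [foldl_update_aux, PySem.Set.ofList_eq_foldl]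
  simp [PySem.Set.update, PySem.Set.empty]

lemma contains_false_of_keys_lt {d : PySem.Dict Int (List Int)} {c : Int}
    (h : ∀ k ∈ d.keys, k < c) : d.contains c = false := by
  cases hc : d.contains c with
  | false => rfl
  | true => exact absurd (h c ((PySem.Dict.contains_iff_mem_keys d c).mp hc)) (lt_irrefl c)

lemma values_insert_fresh (d : PySem.Dict Int (List Int)) (k : Int) (v : List Int)
    (h : d.contains k = false) : (d.insert k v).values = d.values ++ [v] := by
  simp [PySem.Dict.values, PySem.Dict.items_insert_of_not_contains d v h]

lemma runs_values (t : List Int) : ∀ (n prev : Int) (d0 : PySem.Dict Int (List Int)) (cur : List Int),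
    (∀ k ∈ d0.keys, k < prev - n) → (prev :: t).Pairwise (· < ·) →
    ((PySem.List.enumerate t (n + 1)).foldl runStep (d0.insert (prev - n) cur)).values
      = mergeLoop d0.values cur prev t := by
  induction t with
  | nil =>
    intro n prev d0 cur hk _
    simp [PySem.List.enumerate, mergeLoop,
      values_insert_fresh d0 (prev - n) cur (contains_false_of_keys_lt hk)]
  | cons x rest ih =>
    intro n prev d0 cur hk hpw
    have hx : prev < x := (List.pairwise_cons.mp hpw).1 x (List.mem_cons_self)
    have hpw' : (x :: rest).Pairwise (· < ·) := (List.pairwise_cons.mp hpw).2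
    rw [PySem.List.enumerate_cons, List.foldl_cons]
    by_cases hc : x = prev + 1
    · have hkey : x - (n + 1) = prev - n := by omega
      have hstep : runStep (d0.insert (prev - n) cur) (n + 1, x)
          = d0.insert (x - (n + 1)) (cur ++ [x]) := by
        simp [runStep, PySem.Dict.modify, hkey, PySem.Dict.getD_insert_self,
          PySem.Dict.insert_insert_self]
      rw [hstep]
      have := ih (n + 1) x (d0) (cur ++ [x])
        (by intro k hkm; have := hk k hkm; omega) hpw'
      simp only [mergeLoop, if_pos hc]
      exact this
    · have hgt : prev + 1 < x := by omega
      have hkeys : (d0.insert (prev - n) cur).keys = d0.keys ++ [prev - n] :=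
        PySem.Dict.keys_insert_of_not_contains _ _
          (contains_false_of_keys_lt (by intro k hkm; exact hk k hkm))
      have hkall : ∀ k ∈ (d0.insert (prev - n) cur).keys, k < x - (n + 1) := by
        intro k hkm
        rw [hkeys] at hkm
        rcases List.mem_append.mp hkm with h1 | h1
        · have := hk k h1; omega
        · simp at h1; omega
      have hcf : (d0.insert (prev - n) cur).contains (x - (n + 1)) = false :=
        contains_false_of_keys_lt hkall
      have hg : (d0.insert (prev - n) cur).getD (x - (n + 1)) [] = [] := by
        simp [PySem.Dict.getD_of_not_contains, hcf]
      have hstep : runStep (d0.insert (prev - n) cur) (n + 1, x)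
          = (d0.insert (prev - n) cur).insert (x - (n + 1)) [x] := by
        simp [runStep, PySem.Dict.modify, hg]
      rw [hstep]
      have := ih (n + 1) x (d0.insert (prev - n) cur) [x] hkall hpw'
      rw [values_insert_fresh d0 (prev - n) cur
        (contains_false_of_keys_lt (by intro k hkm; exact hk k hkm))] at this
      simp only [mergeLoop, if_neg hc]
      exact this

-- ===== VERDICT (by name: the statement is the Claim_ definition above) =====
theorem merge_indices_spec : Claim_equal_merge_indices := by
  intro L _
  show merge_indices L = merge_indices_alt L
  by_cases hL : L = []
  · subst hL; rfl
  · rw [merge_indices]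
    simp only [if_neg hL]
    rw [foldl_update_eq]
    by_cases hS : PySem.Set.ofList L.flatten = []
    · rw [if_pos hS, merge_indices_alt, hS]; rfl
    · rw [if_neg hS, merge_indices_alt]
      have hpw : (PySem.List.sorted (PySem.Set.ofList L.flatten) (fun x => x) false).Pairwise (· < ·) :=
        PySem.List.sorted_ofList_pairwise_lt L.flatten
      cases heq : PySem.List.sorted (PySem.Set.ofList L.flatten) (fun x => x) false with
      | nil =>
        exfalso
        have := PySem.List.length_sorted (PySem.Set.ofList L.flatten) (fun x => x) false
        rw [heq] at this
        exact hS (List.eq_nil_of_length_eq_zero this.symm)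
      | cons h t =>
        rw [heq] at hpw
        rw [mergeTop, PySem.List.enumerate_cons, List.foldl_cons]
        have hstep : runStep PySem.Dict.empty (0, h) = PySem.Dict.empty.insert (h - 0) [h] := by
          simp [runStep, PySem.Dict.modify, PySem.Dict.getD_empty]
        rw [hstep]
        have := runs_values t 0 h PySem.Dict.empty [h] (by simp [PySem.Dict.keys_empty]) hpw
        simpa using this.symm
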